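-- pv_equiv track=rewrite | github.com/markpollack/spring-ai-project-mgmt | pr-review/ai_conversation_analyzer.py | _summarize_file_types
-- ===== SOURCE A (Python) =====
-- from typing import Dict, List, Optional, Any
--
-- def _summarize_file_types(file_changes: List[Dict[str, Any]]) -> str:
--     """Summarize the types of files changed"""
--     if not file_changes:
--         return "None"
--
--     types = {}
--     for change in file_changes:
--         filename = change.get('filename', '')
--         if filename.endswith('.java'):
--             if 'test' in filename.lower():
--                 types['Java Tests'] = types.get('Java Tests', 0) + 1
--             else:
--                 types['Java Implementation'] = types.get('Java Implementation', 0) + 1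
--         elif filename.endswith(('.yml', '.yaml', '.properties', '.xml')):
--             types['Configuration'] = types.get('Configuration', 0) + 1
--         elif filename.endswith('.md'):
--             types['Documentation'] = types.get('Documentation', 0) + 1
--         else:
--             types['Other'] = types.get('Other', 0) + 1
--
--     return ', '.join(f"{k}: {v}" for k, v in types.items())
-- ===== SOURCE B (Python) =====
-- from typing import Dict, List, Optional, Any
--
--
-- def _classify(filename: str) -> str:
--     """Map one filename to its category label."""
--     if filename.endswith('.java'):
--         return 'Java Tests' if 'test' in filename.lower() else 'Java Implementation'
--     if filename.endswith(('.yml', '.yaml', '.properties', '.xml')):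
--         return 'Configuration'
--     if filename.endswith('.md'):
--         return 'Documentation'
--     return 'Other'
--
--
-- def _summarize_file_types(file_changes: List[Dict[str, Any]]) -> str:
--     """Summarize the types of files changed"""
--     if not file_changes:
--         return "None"
--     labels = [_classify(change.get('filename', '')) for change in file_changes]
--     parts = []
--     while labels:
--         lab = labels[0]
--         rest = [x for x in labels if x != lab]
--         parts.append(f"{lab}: {len(labels) - len(rest)}")
--         labels = rest
--     return ', '.join(parts)
-- ===== Notes on version B (the rewrite author's own statement) =====
-- stated objective: alternative
-- what changed: B classifies each file with a pure helper into a label list and then groups by repeated extraction: take the first remaining label, obtain its count as the length drop after filtering it out, and continue on the shrunken list, so no counting dict (and no per-category counter at all) is ever maintained.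
import Mathlib
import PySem

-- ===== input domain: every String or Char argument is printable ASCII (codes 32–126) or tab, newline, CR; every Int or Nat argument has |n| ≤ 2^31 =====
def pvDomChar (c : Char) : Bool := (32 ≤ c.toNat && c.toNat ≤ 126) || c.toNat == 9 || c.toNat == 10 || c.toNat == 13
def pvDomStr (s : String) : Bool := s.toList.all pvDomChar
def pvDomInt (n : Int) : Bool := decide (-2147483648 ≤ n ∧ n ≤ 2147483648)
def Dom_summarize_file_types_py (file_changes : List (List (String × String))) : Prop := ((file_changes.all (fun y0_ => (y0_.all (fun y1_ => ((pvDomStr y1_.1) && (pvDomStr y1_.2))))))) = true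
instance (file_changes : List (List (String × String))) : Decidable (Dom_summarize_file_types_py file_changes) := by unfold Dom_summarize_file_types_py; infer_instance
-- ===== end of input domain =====

-- B classifies each file into a label list and then groups by repeated extraction (count = length
-- drop after filtering the current label out), maintaining no counting dict or counter at all.

-- ===== PORT A =====
def summarize_file_types_py (file_changes : List (List (String × String))) : String :=
  if file_changes = [] then "None"
  else
    let types : PySem.Dict String Int :=
      file_changes.foldl (fun types change =>
        let filename := (PySem.Dict.mk change).getD "filename" ""
        if PySem.Str.endswith filename ".java" then
          if PySem.Str.isIn "test" (PySem.Str.lower filename) then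
            types.insert "Java Tests" (types.getD "Java Tests" 0 + 1)
          else
            types.insert "Java Implementation" (types.getD "Java Implementation" 0 + 1)
        -- Python's endswith on a tuple = endswith any of the suffixes
        else if PySem.Str.endswith filename ".yml" || PySem.Str.endswith filename ".yaml" ||
                PySem.Str.endswith filename ".properties" || PySem.Str.endswith filename ".xml" then
          types.insert "Configuration" (types.getD "Configuration" 0 + 1)
        else if PySem.Str.endswith filename ".md" then
          types.insert "Documentation" (types.getD "Documentation" 0 + 1)
        else
          types.insert "Other" (types.getD "Other" 0 + 1)) PySem.Dict.empty
    PySem.Str.join ", " (types.items.map (fun kv => kv.1 ++ ": " ++ PySem.Int.toStr kv.2))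

-- ===== PORT B =====
def classifyFile (filename : String) : String :=
  if PySem.Str.endswith filename ".java" then
    if PySem.Str.isIn "test" (PySem.Str.lower filename) then "Java Tests" else "Java Implementation"
  -- Python's endswith on a tuple = endswith any of the suffixes
  else if PySem.Str.endswith filename ".yml" || PySem.Str.endswith filename ".yaml" ||
          PySem.Str.endswith filename ".properties" || PySem.Str.endswith filename ".xml" then
    "Configuration"
  else if PySem.Str.endswith filename ".md" then "Documentation"
  else "Other"

-- the while loop of B: repeatedly extract the first remaining label with its count
def extractParts : List String → List String
  | [] => []
  | lab :: tl =>
      let rest := (lab :: tl).filter (fun x => x ≠ lab)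
      (lab ++ ": " ++ PySem.Int.toStr (((lab :: tl).length : Int) - (rest.length : Int))) ::
        extractParts rest
termination_by ls => ls.length
decreasing_by
  simp only [List.filter_cons, decide_not]
  have h : (List.filter (fun x => !decide (x = lab)) tl).length ≤ tl.length :=
    List.length_filter_le _ _
  simp
  omega

def summarize_file_types_py_alt (file_changes : List (List (String × String))) : String :=
  if file_changes = [] then "None"
  else
    let labels := file_changes.map (fun change => classifyFile ((PySem.Dict.mk change).getD "filename" ""))
    PySem.Str.join ", " (extractParts labels)

-- ===== PRECONDITION & SPEC =====
def Spec_summarize_file_types_py (file_changes : List (List (String × String))) (out : String) : Prop := out = summarize_file_types_py_alt file_changes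
instance (file_changes : List (List (String × String))) (out : String) : Decidable (Spec_summarize_file_types_py file_changes out) := by unfold Spec_summarize_file_types_py; infer_instance

-- ===== CLAIM (what is proved, stated in full; the proofs are below) =====
def Claim_equal_summarize_file_types_py : Prop := ∀ (file_changes : List (List (String × String))), Dom_summarize_file_types_py file_changes → Spec_summarize_file_types_py file_changes (summarize_file_types_py file_changes)

-- ===== LEMMAS AND PROOFS =====

-- A's loop body is "bump the counter at the classified label"
theorem step_eq_counterStep (types : PySem.Dict String Int) (change : List (String × String)) :
    (let filename := (PySem.Dict.mk change).getD "filename" ""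
     if PySem.Str.endswith filename ".java" then
       if PySem.Str.isIn "test" (PySem.Str.lower filename) then
         types.insert "Java Tests" (types.getD "Java Tests" 0 + 1)
       else
         types.insert "Java Implementation" (types.getD "Java Implementation" 0 + 1)
     else if PySem.Str.endswith filename ".yml" || PySem.Str.endswith filename ".yaml" ||
             PySem.Str.endswith filename ".properties" || PySem.Str.endswith filename ".xml" then
       types.insert "Configuration" (types.getD "Configuration" 0 + 1)
     else if PySem.Str.endswith filename ".md" then
       types.insert "Documentation" (types.getD "Documentation" 0 + 1)
     else
       types.insert "Other" (types.getD "Other" 0 + 1)) =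
    (let lab := classifyFile ((PySem.Dict.mk change).getD "filename" "")
     types.insert lab (types.getD lab 0 + 1)) := by
  simp only [classifyFile]
  split_ifs <;> rfl

-- adding an element already present leaves foldl-add unchanged on later occurrences
theorem set_contains_iff (s : List String) (x : String) : PySem.Set.contains s x = true ↔ x ∈ s := by
  simp [PySem.Set.contains]

theorem mem_set_add (s : List String) (x y : String) (h : y ∈ s) : y ∈ PySem.Set.add s x := by
  simp only [PySem.Set.add]
  split
  · exact h
  · exact List.mem_append_left _ h

theorem foldl_add_filter (a : String) (l s : List String) (ha : a ∈ s) :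
    List.foldl PySem.Set.add s l = List.foldl PySem.Set.add s (l.filter (fun x => x ≠ a)) := by
  induction l generalizing s with
  | nil => rfl
  | cons x tl ih =>
    by_cases hx : x = a
    · subst hx
      have hadd : PySem.Set.add s x = s := by
        simp only [PySem.Set.add, (set_contains_iff s x).mpr ha, if_true]
      have hfc : (x :: tl).filter (fun y => y ≠ x) = tl.filter (fun y => y ≠ x) := by
        simp
      rw [hfc, List.foldl_cons, hadd]
      exact ih s ha
    · have hfc : (x :: tl).filter (fun y => y ≠ a) = x :: tl.filter (fun y => y ≠ a) := by
        simp [hx]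
      rw [hfc, List.foldl_cons, List.foldl_cons]
      exact ih _ (mem_set_add s x a ha)

theorem foldl_add_cons (a : String) (l s : List String) (hl : ∀ x ∈ l, x ≠ a) :
    List.foldl PySem.Set.add (a :: s) l = a :: List.foldl PySem.Set.add s l := by
  induction l generalizing s with
  | nil => rfl
  | cons x tl ih =>
    have hx : x ≠ a := hl x (by simp)
    have hstep : PySem.Set.add (a :: s) x = a :: PySem.Set.add s x := by
      simp only [PySem.Set.add, PySem.Set.contains, List.contains_cons]
      have hba : (x == a) = false := by simp [hx]
      rw [hba]
      simp only [Bool.false_or]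
      split <;> simp
    rw [List.foldl_cons, hstep, List.foldl_cons, ih _ (fun y hy => hl y (by simp [hy]))]

theorem ofList_cons_filter (a : String) (l : List String) :
    PySem.Set.ofList (a :: l) = a :: PySem.Set.ofList (l.filter (fun x => x ≠ a)) := by
  have h1 : PySem.Set.ofList (a :: l) = List.foldl PySem.Set.add [a] l := by
    simp [PySem.Set.ofList_eq_foldl, PySem.Set.add, PySem.Set.contains]
  rw [h1, foldl_add_filter a l [a] (by simp),
      foldl_add_cons a _ [] (by intro x hx; simp [List.mem_filter] at hx; exact hx.2)]
  rw [PySem.Set.ofList_eq_foldl]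

-- length = (count of a) + (length after removing all a's)
theorem len_split (a : String) (l : List String) :
    l.length = l.count a + (l.filter (fun x => x ≠ a)).length := by
  induction l with
  | nil => simp
  | cons y ys ih =>
    by_cases hy : y = a <;>
      simp_all [List.length_cons] <;> omega

-- B's extraction loop produces exactly the first-seen-ordered (label, count) lines
theorem extract_eq (ls : List String) :
    extractParts ls =
      (PySem.Set.ofList ls).map (fun k => k ++ ": " ++ PySem.Int.toStr ((ls.count k : Int))) := by
  induction hls : ls.length using Nat.strong_induction_on generalizing ls with
  | _ n ih =>
  cases ls with
  | nil => rw [extractParts]; rfl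
  | cons a tl =>
    have hrest : (a :: tl).filter (fun x => x ≠ a) = tl.filter (fun x => x ≠ a) := by
      simp
    have hlen : (tl.filter (fun x => x ≠ a)).length < n := by
      subst hls
      exact Nat.lt_succ_of_le (List.length_filter_le _ _)
    rw [extractParts, ofList_cons_filter]
    simp only [hrest, List.map_cons, List.cons.injEq]
    constructor
    · -- the head line: count a = total length - filtered length
      have hs := len_split a (a :: tl)
      rw [hrest] at hs
      have hInt : (((a :: tl).length : Int)) - ((tl.filter (fun x => x ≠ a)).length : Int) =
          (((a :: tl).count a : Nat) : Int) := by omega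
      rw [hInt]
    · -- the tail: counts are unchanged by removing a (elements there differ from a)
      rw [ih _ hlen _ rfl]
      apply List.map_congr_left
      intro k hk
      have hk' : k ∈ tl.filter (fun x => x ≠ a) := by
        have := PySem.Set.mem_ofList (xs := tl.filter (fun x => x ≠ a)) (y := k)
        simp_all
      have hka : k ≠ a := by
        simp [List.mem_filter] at hk'
        exact hk'.2
      have hcount : (tl.filter (fun x => x ≠ a)).count k = (a :: tl).count k := by
        rw [List.count_filter (by simp [hka]), List.count_cons]
        simp [Ne.symm hka]
      rw [hcount]

-- ===== VERDICT (by name: the statement is the Claim_ definition above) =====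
theorem summarize_file_types_py_spec : Claim_equal_summarize_file_types_py := by
  intro file_changes _
  show summarize_file_types_py file_changes = summarize_file_types_py_alt file_changes
  unfold summarize_file_types_py summarize_file_types_py_alt
  by_cases h : file_changes = []
  · simp [h]
  · simp only [if_neg h]
    have hfold :
        file_changes.foldl (fun types change =>
          let filename := (PySem.Dict.mk change).getD "filename" ""
          if PySem.Str.endswith filename ".java" then
            if PySem.Str.isIn "test" (PySem.Str.lower filename) then
              types.insert "Java Tests" (types.getD "Java Tests" 0 + 1)
            else
              types.insert "Java Implementation" (types.getD "Java Implementation" 0 + 1)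
          else if PySem.Str.endswith filename ".yml" || PySem.Str.endswith filename ".yaml" ||
                  PySem.Str.endswith filename ".properties" || PySem.Str.endswith filename ".xml" then
            types.insert "Configuration" (types.getD "Configuration" 0 + 1)
          else if PySem.Str.endswith filename ".md" then
            types.insert "Documentation" (types.getD "Documentation" 0 + 1)
          else
            types.insert "Other" (types.getD "Other" 0 + 1)) PySem.Dict.empty =
        PySem.Dict.counter (file_changes.map (fun change => classifyFile ((PySem.Dict.mk change).getD "filename" ""))) := by
      rw [← PySem.Dict.foldl_insert_getD_add_one_eq_counter, List.foldl_map]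
      exact PySem.List.foldl_congr_mem _ _ _ _ (fun d c _ => step_eq_counterStep d c)
    rw [hfold, PySem.Dict.items_counter, List.map_map, extract_eq]
    rfl
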